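-- pv_equiv track=rewrite | github.com/thecodearrow/InterviewBit-Python-Solutions | Trees/Hotel Reviews.py | solve
-- ===== SOURCE A (Python) =====
-- class Trie:
--     def __init__(self):
--         self.letters={}
--
--     def addString(self,string):
--         letters=self.letters
--         for c in string:
--             if(c not in letters):
--                 letters[c]={}
--             letters=letters[c]
--
--         letters["*"]=True #Marks the end of a word
--
--     def containsString(self,string):
--         letters=self.letters
--         for c in string:
--             if(c not in letters):
--                 return False
--             letters=letters[c]
--
--         if("*" in letters):
--             #end of string
--             return True
--         return False
--
-- def solve(A, B):
--     keywords=A.split("_")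
--     t=Trie()
--     for s in keywords:
--         t.addString(s)
--
--     good_reviews=[]
--     for i,word in enumerate(B):
--         score=0
--         for w in word.split("_"):
--             if(t.containsString(w)):
--                 score+=1
--         good_reviews.append([i,score])
--
--     good_reviews=sorted(good_reviews,key=lambda x:x[1],reverse=True)
--
--     review_order=[]
--     for idx,score in good_reviews:
--         review_order.append(idx)
--
--     return review_order
-- ===== SOURCE B (Python) =====
-- def solve(A, B):
--     keywords = set(A.split("_"))
--     scores = [sum(w in keywords for w in review.split("_")) for review in B]
--     top = max(scores, default=0)
--     buckets = [[] for _ in range(top + 1)]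
--     for i, s in enumerate(scores):
--         buckets[s].append(i)
--     order = []
--     for s in range(top, -1, -1):
--         order.extend(buckets[s])
--     return order
-- ===== Notes on version B (the rewrite author's own statement) =====
-- stated objective: faster
-- what changed: Replaces the hand-built character Trie by a plain set of keywords and replaces the stable comparison sort of (index,score) pairs by a counting/bucket pass: indices are appended to buckets[score] in enumeration order and the buckets are concatenated from the highest score down.
-- outside the precondition, e.g. on solve('a*', ['b', 'a']): A returns [1, 0], B returns [0, 1]; on solve('a', ['a*']): A raises TypeError, B returns [0]
import Mathlib
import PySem

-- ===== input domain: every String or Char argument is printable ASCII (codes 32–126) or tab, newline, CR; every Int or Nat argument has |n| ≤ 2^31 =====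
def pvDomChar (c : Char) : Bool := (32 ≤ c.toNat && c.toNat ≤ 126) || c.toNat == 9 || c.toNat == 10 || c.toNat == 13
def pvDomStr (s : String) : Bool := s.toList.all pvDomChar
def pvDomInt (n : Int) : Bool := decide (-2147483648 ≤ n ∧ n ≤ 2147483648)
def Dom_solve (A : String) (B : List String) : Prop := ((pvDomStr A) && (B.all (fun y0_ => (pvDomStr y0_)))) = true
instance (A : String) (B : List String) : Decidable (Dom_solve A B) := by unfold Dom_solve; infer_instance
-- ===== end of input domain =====

-- B replaces A's character Trie by a set of whole keywords and A's stable descending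
-- comparison sort by a counting/bucket pass over the scores (objective: faster, constant factor).

-- ===== PORT A =====
-- A's Trie is a dict whose values are either a nested dict or the bool True
-- (stored under the end-of-word marker key '*'); modelled exactly by this mutual pair.
mutual
inductive TVal : Type where
  | b : Bool → TVal
  | d : TDict → TVal
inductive TDict : Type where
  | nil : TDict
  | cons : Char → TVal → TDict → TDict
end

-- letters[c] (dict lookup)
def tget : TDict → Char → Option TVal
  | .nil, _ => none
  | .cons k v rest, c => if k = c then some v else tget rest c

-- letters[c] = v (dict assignment: overwrite keeps position, new keys append)
def tset : TDict → Char → TVal → TDict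
  | .nil, c, v => .cons c v .nil
  | .cons k w rest, c, v => if k = c then .cons k v rest else .cons k w (tset rest c v)

-- Trie.addString, as recursion over the characters (Python fills the nested dicts in place)
def addString : TDict → List Char → TDict
  | t, [] => tset t '*' (.b true)
  | t, c :: cs =>
    match tget t c with
    | some (.d sub) => tset t c (.d (addString sub cs))
    | some (.b _) => t            -- Python raises TypeError here (descending into True); excluded by Pre_solve
    | none => tset t c (.d (addString .nil cs))

-- Trie.containsString
def containsString : TDict → List Char → Bool
  | t, [] => (tget t '*').isSome
  | t, c :: cs =>
    match tget t c with
    | none => false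
    | some (.d sub) => containsString sub cs
    | some (.b _) => false        -- Python raises TypeError here (membership test on True); excluded by Pre_solve

def solve (A : String) (B : List String) : List Int :=
  let keywords := (PySem.Str.split? A "_").getD []
  let t := keywords.foldl (fun t s => addString t s.toList) TDict.nil
  let good := (PySem.List.enumerate B).foldl (fun acc p =>
      acc ++ [(p.1,
        ((PySem.Str.split? p.2 "_").getD []).foldl
          (fun score w => if containsString t w.toList then score + 1 else score) (0 : Int))]) []
  let sortedGood := PySem.List.sorted good (fun x => x.2) true
  sortedGood.foldl (fun acc p => acc ++ [p.1]) []

-- ===== PORT B =====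
def solve_alt (A : String) (B : List String) : List Int :=
  let keywords : PySem.Set String := PySem.Set.ofList ((PySem.Str.split? A "_").getD [])
  let scores : List Int := B.map (fun review =>
      (((PySem.Str.split? review "_").getD []).map
        (fun w => if keywords.contains w then (1 : Int) else 0)).sum)
  let top : Int := PySem.List.maxD scores (fun x => x) 0
  let buckets0 : List (List Int) := (PySem.List.pyRange 0 (top + 1) 1).map (fun _ => [])
  let buckets := (PySem.List.enumerate scores).foldl
      (fun bs p => PySem.List.pySetD bs p.2 (PySem.List.pyGetD bs p.2 [] ++ [p.1])) buckets0
  (PySem.List.pyRange top (-1) (-1)).foldl (fun acc s => acc ++ PySem.List.pyGetD buckets s []) []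

-- ===== PRECONDITION & SPEC =====
-- Pre_ excludes exactly the inputs on which A's end-of-word marker "*" collides with a
-- literal '*' character: a keyword extending another keyword by '*' (the build or a lookup
-- descends into the bool marker and raises TypeError, or silently drops a keyword), a review
-- word extending a keyword by '*' (lookup raises TypeError), or a non-keyword review word w
-- with w ++ "*" a prefix of a keyword (the marker test sees the '*' child dict and A scores a
-- spurious match).
def Pre_solve (A : String) (B : List String) : Prop :=
  (∀ k ∈ (PySem.Str.split? A "_").getD [], ∀ k' ∈ (PySem.Str.split? A "_").getD [],
      ¬ ((k.toList ++ ['*']) <+: k'.toList)) ∧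
  (∀ r ∈ B, ∀ w ∈ (PySem.Str.split? r "_").getD [],
      (∀ k ∈ (PySem.Str.split? A "_").getD [], ¬ ((k.toList ++ ['*']) <+: w.toList)) ∧
      ((∃ k ∈ (PySem.Str.split? A "_").getD [], ((w.toList ++ ['*']) <+: k.toList)) →
        w ∈ (PySem.Str.split? A "_").getD []))
instance (A : String) (B : List String) : Decidable (Pre_solve A B) := by unfold Pre_solve; infer_instance

def pvWitness_solve : String × List String := ("a_b", ["b_c_a", "x", "a_a"])

def Spec_solve (A : String) (B : List String) (out : List Int) : Prop := out = solve_alt A B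
instance (A : String) (B : List String) (out : List Int) : Decidable (Spec_solve A B out) := by unfold Spec_solve; infer_instance

-- ===== CLAIM (what is proved, stated in full; the proofs are below) =====
def Claim_equal_solve : Prop := ∀ (A : String) (B : List String), Dom_solve A B → Pre_solve A B → Spec_solve A B (solve A B)

-- ===== LEMMAS AND PROOFS =====

-- dict primitives
theorem tget_tset_eq : ∀ (t : TDict) (c : Char) (v : TVal), tget (tset t c v) c = some v
  | .nil, c, v => by simp [tset, tget]
  | .cons k w rest, c, v => by
    by_cases h : k = c <;> simp [tset, tget, h, tget_tset_eq rest c v]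

theorem tget_tset_ne : ∀ (t : TDict) (c a : Char) (v : TVal), c ≠ a →
    tget (tset t c v) a = tget t a
  | .nil, c, a, v, h => by simp [tset, tget, h]
  | .cons k w rest, c, a, v, h => by
    by_cases hk : k = c
    · subst hk; simp [tset, tget, h]
    · have h2 : a ≠ c := Ne.symm h
      by_cases hka : k = a <;> simp [tset, tget, hk, hka, h2, tget_tset_ne rest c a v h]

-- the tails of the keywords that start with c, in order
def tails_of (K : List (List Char)) (c : Char) : List (List Char) :=
  K.filterMap (fun k => match k with
    | [] => none
    | a :: as => if a = c then some as else none)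

theorem mem_tails_of (K : List (List Char)) (c : Char) (ws : List Char) :
    ws ∈ tails_of K c ↔ c :: ws ∈ K := by
  constructor
  · intro h
    rcases List.mem_filterMap.mp h with ⟨k, hk, hfk⟩
    match k with
    | [] => simp at hfk
    | a :: as =>
      dsimp only at hfk
      by_cases ha : a = c
      · rw [if_pos ha] at hfk
        cases hfk
        exact ha ▸ hk
      · rw [if_neg ha] at hfk
        cases hfk
  · intro h
    exact List.mem_filterMap.mpr ⟨c :: ws, h, by simp⟩

theorem tails_of_append (K L : List (List Char)) (c : Char) :
    tails_of (K ++ L) c = tails_of K c ++ tails_of L c :=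
  List.filterMap_append

-- the root edge of the built trie, as a function of the keyword list
theorem build_tget (K : List (List Char))
    (hKK : ∀ k ∈ K, ∀ k' ∈ K, ¬ ((k ++ ['*']) <+: k')) : ∀ (c : Char),
    tget (K.foldl addString TDict.nil) c =
      if c = '*' ∧ [] ∈ K then some (TVal.b true)
      else if tails_of K c = [] then none
      else some (TVal.d ((tails_of K c).foldl addString TDict.nil)) := by
  induction K using List.reverseRecOn with
  | nil => intro c; simp [tget, tails_of]
  | append_singleton K k ih =>
    intro c
    have hKK' : ∀ a ∈ K, ∀ b ∈ K, ¬ ((a ++ ['*']) <+: b) :=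
      fun a ha b hb => hKK a (List.mem_append_left _ ha) b (List.mem_append_left _ hb)
    rw [List.foldl_append, List.foldl_cons, List.foldl_nil]
    match k with
    | [] =>
      rw [addString]
      by_cases hc : c = '*'
      · subst hc
        rw [tget_tset_eq, if_pos ⟨rfl, List.mem_append_right _ List.mem_cons_self⟩]
      · rw [tget_tset_ne _ '*' c _ (fun h => hc h.symm), ih hKK', tails_of_append]
        have h1 : tails_of [([] : List Char)] c = [] := by simp [tails_of]
        have h2 : ¬ (c = '*' ∧ [] ∈ K) := fun h => hc h.1
        have h3 : ¬ (c = '*' ∧ [] ∈ K ++ [[]]) := fun h => hc h.1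
        rw [h1, List.append_nil, if_neg h2, if_neg h3]
    | a :: as =>
      have hmem : ([] : List Char) ∈ K ++ [a :: as] ↔ ([] : List Char) ∈ K := by simp
      have htail : tails_of [a :: as] c = if a = c then [as] else [] := by
        by_cases ha : a = c <;> simp [tails_of, ha]
      rw [addString]
      cases h : tget (K.foldl addString TDict.nil) a with
      | some v =>
        cases v with
        | b bb =>
          exfalso
          rw [ih hKK' a] at h
          by_cases h1 : a = '*' ∧ [] ∈ K
          · exact hKK [] (List.mem_append_left _ h1.2) (a :: as)
              (List.mem_append_right _ List.mem_cons_self) (h1.1 ▸ ⟨as, rfl⟩)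
          · rw [if_neg h1] at h
            split at h <;> simp at h
        | d sub =>
          rw [ih hKK' a] at h
          have h1 : ¬ (a = '*' ∧ [] ∈ K) := fun h1 => by rw [if_pos h1] at h; cases h
          rw [if_neg h1] at h
          have h2 : tails_of K a ≠ [] := fun h2 => by rw [if_pos h2] at h; cases h
          rw [if_neg h2] at h
          have hsub : sub = (tails_of K a).foldl addString TDict.nil := by
            cases h; rfl
          by_cases hca : a = c
          · subst hca
            rw [tget_tset_eq, tails_of_append, htail, if_pos rfl]
            have h3 : ¬ (a = '*' ∧ [] ∈ K ++ [a :: as]) := fun h3 => h1 ⟨h3.1, hmem.mp h3.2⟩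
            rw [if_neg h3, if_neg (by simp [h2]), hsub, List.foldl_append, List.foldl_cons,
              List.foldl_nil]
          · rw [tget_tset_ne _ a c _ hca, ih hKK' c, tails_of_append, htail, if_neg hca,
              List.append_nil]
            have h3 : (c = '*' ∧ [] ∈ K ++ [a :: as]) ↔ (c = '*' ∧ [] ∈ K) := by
              constructor
              · exact fun h3 => ⟨h3.1, hmem.mp h3.2⟩
              · exact fun h3 => ⟨h3.1, List.mem_append_left _ h3.2⟩
            by_cases h4 : c = '*' ∧ [] ∈ K
            · rw [if_pos h4, if_pos (h3.mpr h4)]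
            · rw [if_neg h4, if_neg (fun hh => h4 (h3.mp hh))]
      | none =>
        rw [ih hKK' a] at h
        have h1 : ¬ (a = '*' ∧ [] ∈ K) := fun h1 => by rw [if_pos h1] at h; cases h
        rw [if_neg h1] at h
        have h2 : tails_of K a = [] := by
          by_contra h2
          rw [if_neg h2] at h; cases h
        by_cases hca : a = c
        · subst hca
          rw [tget_tset_eq, tails_of_append, htail, if_pos rfl, h2, List.nil_append]
          have h3 : ¬ (a = '*' ∧ [] ∈ K ++ [a :: as]) := fun h3 => h1 ⟨h3.1, hmem.mp h3.2⟩
          rw [if_neg h3, if_neg (by simp)]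
          rfl
        · rw [tget_tset_ne _ a c _ hca, ih hKK' c, tails_of_append, htail, if_neg hca,
            List.append_nil]
          have h3 : (c = '*' ∧ [] ∈ K ++ [a :: as]) ↔ (c = '*' ∧ [] ∈ K) := by
            constructor
            · exact fun h3 => ⟨h3.1, hmem.mp h3.2⟩
            · exact fun h3 => ⟨h3.1, List.mem_append_left _ h3.2⟩
          by_cases h4 : c = '*' ∧ [] ∈ K
          · rw [if_pos h4, if_pos (h3.mpr h4)]
          · rw [if_neg h4, if_neg (fun hh => h4 (h3.mp hh))]

-- A's Trie membership = list membership, on the marker-collision-free inputs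
theorem contains_spec (w : List Char) : ∀ (K : List (List Char)),
    (∀ k ∈ K, ∀ k' ∈ K, ¬ ((k ++ ['*']) <+: k')) →
    (∀ k ∈ K, ¬ ((k ++ ['*']) <+: w)) →
    ((∃ k ∈ K, ((w ++ ['*']) <+: k)) → w ∈ K) →
    containsString (K.foldl addString TDict.nil) w = decide (w ∈ K) := by
  induction w with
  | nil =>
    intro K hKK hb hc
    rw [containsString, build_tget K hKK '*']
    by_cases h1 : ([] : List Char) ∈ K
    · simp [h1]
    · have h2 : tails_of K '*' = [] := by
        by_contra h2
        obtain ⟨ws, hws⟩ := List.exists_mem_of_ne_nil _ h2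
        exact h1 (hc ⟨'*' :: ws, (mem_tails_of K '*' ws).mp hws, ⟨ws, rfl⟩⟩)
      simp [h1, h2]
  | cons c ws ih =>
    intro K hKK hb hc
    rw [containsString, build_tget K hKK c]
    by_cases h1 : c = '*' ∧ ([] : List Char) ∈ K
    · exact absurd (show (([] : List Char) ++ ['*']) <+: c :: ws from h1.1 ▸ ⟨ws, rfl⟩)
        (hb [] h1.2)
    · rw [if_neg h1]
      by_cases h2 : tails_of K c = []
      · rw [if_pos h2]
        have h3 : c :: ws ∉ K := fun hmem => by
          have := (mem_tails_of K c ws).mpr hmem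
          rw [h2] at this
          cases this
        simp [h3]
      · rw [if_neg h2]
        dsimp only
        rw [ih (tails_of K c)
          (fun k hk k' hk' hpre => hKK (c :: k) ((mem_tails_of K c k).mp hk) (c :: k')
            ((mem_tails_of K c k').mp hk') (List.cons_prefix_cons.mpr ⟨rfl, hpre⟩))
          (fun k hk hpre => hb (c :: k) ((mem_tails_of K c k).mp hk)
            (List.cons_prefix_cons.mpr ⟨rfl, hpre⟩))
          (fun ⟨k, hk, hpre⟩ => (mem_tails_of K c ws).mpr
            (hc ⟨c :: k, (mem_tails_of K c k).mp hk, List.cons_prefix_cons.mpr ⟨rfl, hpre⟩⟩))]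
        simp [mem_tails_of]

theorem score_eq (A review : String)
    (hKK : ∀ k ∈ (PySem.Str.split? A "_").getD [], ∀ k' ∈ (PySem.Str.split? A "_").getD [],
      ¬ ((k.toList ++ ['*']) <+: k'.toList))
    (hrw : ∀ w ∈ (PySem.Str.split? review "_").getD [],
      (∀ k ∈ (PySem.Str.split? A "_").getD [], ¬ ((k.toList ++ ['*']) <+: w.toList)) ∧
      ((∃ k ∈ (PySem.Str.split? A "_").getD [], ((w.toList ++ ['*']) <+: k.toList)) →
        w ∈ (PySem.Str.split? A "_").getD [])) :
    ((PySem.Str.split? review "_").getD []).foldl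
      (fun score w => if containsString
          (((PySem.Str.split? A "_").getD []).foldl (fun t s => addString t s.toList) TDict.nil)
          w.toList then score + 1 else score) (0 : Int)
    = (((PySem.Str.split? review "_").getD []).map
        (fun w => if (PySem.Set.ofList ((PySem.Str.split? A "_").getD [])).contains w
                  then (1 : Int) else 0)).sum := by
  rw [PySem.List.foldl_if_add_one, PySem.List.sum_map_ite_one_zero, zero_add]
  congr 1
  apply List.countP_congr
  intro w hw
  obtain ⟨hbw, hcw⟩ := hrw w hw
  have h1 : containsString
      (((PySem.Str.split? A "_").getD []).foldl (fun t s => addString t s.toList) TDict.nil)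
      w.toList
      = decide (w.toList ∈ ((PySem.Str.split? A "_").getD []).map String.toList) := by
    rw [← List.foldl_map (f := String.toList) (g := addString),
      contains_spec w.toList (((PySem.Str.split? A "_").getD []).map String.toList)
        (by intro k hk k' hk' hpre
            rcases List.mem_map.mp hk with ⟨q, hq, rfl⟩
            rcases List.mem_map.mp hk' with ⟨q', hq', rfl⟩
            exact hKK q hq q' hq' hpre)
        (by intro k hk hpre
            rcases List.mem_map.mp hk with ⟨q, hq, rfl⟩
            exact hbw q hq hpre)
        (by rintro ⟨k, hk, hpre⟩
            rcases List.mem_map.mp hk with ⟨q, hq, rfl⟩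
            exact List.mem_map_of_mem (hcw ⟨q, hq, hpre⟩))]
  rw [h1]
  constructor
  · intro h
    have hmem : w ∈ (PySem.Str.split? A "_").getD [] := by
      rcases List.mem_map.mp (of_decide_eq_true h) with ⟨q, hq, hql⟩
      rwa [← String.toList_inj.mp hql]
    rw [show ((PySem.Set.ofList ((PySem.Str.split? A "_").getD [])).contains w = true)
        ↔ w ∈ (PySem.Str.split? A "_").getD [] from by
      simp [PySem.Set.contains, PySem.Set.mem_ofList]]
    exact hmem
  · intro h
    apply decide_eq_true
    apply List.mem_map_of_mem
    rw [show ((PySem.Set.ofList ((PySem.Str.split? A "_").getD [])).contains w = true)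
        ↔ w ∈ (PySem.Str.split? A "_").getD [] from by
      simp [PySem.Set.contains, PySem.Set.mem_ofList]] at h
    exact h

theorem insertBy_skip {α : Type} (bf : α → α → Bool) (x : α) (as bs : List α)
    (h : ∀ y ∈ as, bf x y = false) :
    PySem.List.insertBy bf x (as ++ bs) = as ++ PySem.List.insertBy bf x bs := by
  induction as with
  | nil => rfl
  | cons a as ih =>
    rw [List.cons_append, PySem.List.insertBy, h a List.mem_cons_self]
    simp only [Bool.false_eq_true, if_false, List.cons_append]
    rw [ih (fun y hy => h y (List.mem_cons_of_mem _ hy))]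

theorem insertBy_front {α : Type} (bf : α → α → Bool) (x : α) (bs : List α)
    (h : ∀ y ∈ bs, bf x y = true) :
    PySem.List.insertBy bf x bs = x :: bs := by
  cases bs with
  | nil => rfl
  | cons b bs => rw [PySem.List.insertBy, h b List.mem_cons_self]; simp

theorem flatMap_congr_mem {α β : Type} (D : List α) (f g : α → List β)
    (h : ∀ s ∈ D, f s = g s) : D.flatMap f = D.flatMap g := by
  induction D with
  | nil => rfl
  | cons s D ih =>
    rw [List.flatMap_cons, List.flatMap_cons, h s List.mem_cons_self,
      ih (fun q hq => h q (List.mem_cons_of_mem _ hq))]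

theorem insertBy_buckets {α : Type} (key : α → Int) (x : α) :
    ∀ (D : List Int) (F : Int → List α), D.Pairwise (· > ·) →
    (∀ s ∈ D, ∀ y ∈ F s, key y = s) → key x ∈ D →
    PySem.List.insertBy (fun a b => decide (key b < key a)) x (D.flatMap F)
      = D.flatMap (fun s => F s ++ if key x = s then [x] else []) := by
  intro D
  induction D with
  | nil => intro F _ _ hx; simp at hx
  | cons s D' ih =>
    intro F hD hF hx
    have hgt : ∀ s' ∈ D', s' < s := fun s' hs' => (List.pairwise_cons.mp hD).1 s' hs'
    rw [List.flatMap_cons, List.flatMap_cons]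
    by_cases h : key x = s
    · have hskip : ∀ y ∈ F s, (fun a b => decide (key b < key a)) x y = false := by
        intro y hy
        have hy' := hF s List.mem_cons_self y hy
        simp [hy', h]
      rw [insertBy_skip _ _ _ _ hskip]
      have hfront : ∀ y ∈ D'.flatMap F, (fun a b => decide (key b < key a)) x y = true := by
        intro y hy
        rcases List.mem_flatMap.mp hy with ⟨s', hs', hys'⟩
        have hy' : key y = s' := hF s' (List.mem_cons_of_mem _ hs') y hys'
        simpa [hy', h] using hgt s' hs'
      rw [insertBy_front _ _ _ hfront, if_pos h]
      rw [flatMap_congr_mem D' (fun s' => F s' ++ if key x = s' then [x] else []) F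
        (by intro s' hs'
            have : key x ≠ s' := by have := hgt s' hs'; omega
            simp [this])]
      simp
    · have hx' : key x ∈ D' := by
        rcases List.mem_cons.mp hx with h1 | h1
        · exact absurd h1 h
        · exact h1
      have hskip : ∀ y ∈ F s, (fun a b => decide (key b < key a)) x y = false := by
        intro y hy
        have hy' := hF s List.mem_cons_self y hy
        have hlt : key x < s := hgt _ hx'
        simp only [hy', decide_eq_false_iff_not]
        omega
      rw [insertBy_skip _ _ _ _ hskip, if_neg h,
        ih F (List.pairwise_cons.mp hD).2 (fun q hq => hF q (List.mem_cons_of_mem _ hq)) hx']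
      simp

-- Python's stable descending sort IS bucket collection in descending key order
theorem sorted_rev_buckets {α : Type} (key : α → Int) (xs : List α) (D : List Int)
    (hD : D.Pairwise (· > ·)) (hk : ∀ x ∈ xs, key x ∈ D) :
    PySem.List.sorted xs key true = D.flatMap (fun s => xs.filter (fun x => decide (key x = s))) := by
  induction xs using List.reverseRecOn with
  | nil => simp [show PySem.List.sorted ([] : List α) key true = [] from
      (PySem.List.sorted_eq_nil_iff [] key true).mpr rfl]
  | append_singleton xs x ih =>
    have hk' : ∀ y ∈ xs, key y ∈ D := fun y hy => hk y (List.mem_append_left _ hy)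
    rw [PySem.List.sorted_rev_eq_foldl_insertBy, List.foldl_append, List.foldl_cons,
      List.foldl_nil, ← PySem.List.sorted_rev_eq_foldl_insertBy, ih hk',
      insertBy_buckets key x D _ hD
        (by intro s hs y hy
            have := List.mem_filter.mp hy
            exact of_decide_eq_true this.2)
        (hk x (List.mem_append_right _ List.mem_cons_self))]
    apply flatMap_congr_mem
    intro s _
    rw [List.filter_append]
    congr 1
    by_cases h : key x = s <;> simp [h]

-- enumerate commutes with mapping the payload
theorem enumerate_map {α β : Type} (f : α → β) (L : List α) :
    ∀ (s : Int), (PySem.List.enumerate L s).map (fun p => (p.1, f p.2))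
      = PySem.List.enumerate (L.map f) s := by
  induction L with
  | nil => intro s; simp [PySem.List.enumerate_nil]
  | cons a L ih => intro s; simp [PySem.List.enumerate_cons, ih]

-- the bucket-filling fold, characterised bucket by bucket
theorem max?_cons_mem : ∀ (t : List Int) (a : Int),
    ∃ m, PySem.List.max? (a :: t) (fun v => v) = some m ∧ (m = a ∨ m ∈ t) := by
  intro t
  induction t with
  | nil => intro a; exact ⟨a, by simp [PySem.List.max?], Or.inl rfl⟩
  | cons y t' ih =>
    intro a
    have hstep : PySem.List.max? (a :: y :: t') (fun v => v)
        = PySem.List.max? ((if a < y then y else a) :: t') (fun v => v) := by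
      by_cases h : a < y <;> simp [PySem.List.max?, h]
    obtain ⟨m, hm, hmem⟩ := ih (if a < y then y else a)
    refine ⟨m, hstep ▸ hm, ?_⟩
    rcases hmem with h1 | h1
    · by_cases h : a < y
      · rw [if_pos h] at h1; exact Or.inr (h1 ▸ List.mem_cons_self)
      · rw [if_neg h] at h1; exact Or.inl h1
    · exact Or.inr (List.mem_cons_of_mem _ h1)

theorem max?_mem_of_ne_nil (xs : List Int) (hne : xs ≠ []) :
    ∃ m, PySem.List.max? xs (fun v => v) = some m ∧ m ∈ xs := by
  cases xs with
  | nil => exact absurd rfl hne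
  | cons x t =>
    obtain ⟨m, hm, hmem⟩ := max?_cons_mem t x
    refine ⟨m, hm, ?_⟩
    rcases hmem with h1 | h1
    · exact h1 ▸ List.mem_cons_self
    · exact List.mem_cons_of_mem _ h1

theorem buckets_inv (N : Nat) :
    ∀ (E : List (Int × Int)) (bs : List (List Int)), bs.length = N →
    (∀ p ∈ E, 0 ≤ p.2 ∧ p.2 < (N : Int)) →
    (E.foldl (fun bs p => PySem.List.pySetD bs p.2 (PySem.List.pyGetD bs p.2 [] ++ [p.1])) bs).length = N ∧
    ∀ j : Nat, j < N →
      PySem.List.pyGetD (E.foldl (fun bs p => PySem.List.pySetD bs p.2 (PySem.List.pyGetD bs p.2 [] ++ [p.1])) bs) (j : Int) []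
        = PySem.List.pyGetD bs (j : Int) [] ++ (E.filter (fun p => decide (p.2 = (j : Int)))).map (·.1) := by
  intro E
  induction E with
  | nil => intro bs hlen _; exact ⟨hlen, fun j hj => by simp⟩
  | cons p E' ih =>
    intro bs hlen hE
    obtain ⟨h0, hN⟩ := hE p List.mem_cons_self
    have hsp : p.2 = (p.2.toNat : Int) := (Int.toNat_of_nonneg h0).symm
    have hslt : p.2.toNat < N := by omega
    have hset : PySem.List.pySetD bs p.2 (PySem.List.pyGetD bs p.2 [] ++ [p.1])
        = bs.set p.2.toNat (PySem.List.pyGetD bs p.2 [] ++ [p.1]) := by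
      have h' : PySem.List.pySet? bs p.2 (PySem.List.pyGetD bs p.2 [] ++ [p.1])
          = some (bs.set p.2.toNat (PySem.List.pyGetD bs p.2 [] ++ [p.1])) := by
        conv_lhs => rw [hsp]
        rw [PySem.List.pySet?_natCast _ _ _ (by rw [hlen]; exact hslt), ← hsp]
      rw [PySem.List.pySetD, h', Option.getD_some]
    rw [List.foldl_cons, hset]
    obtain ⟨ihlen, ihget⟩ := ih (bs.set p.2.toNat (PySem.List.pyGetD bs p.2 [] ++ [p.1]))
      (by rw [List.length_set]; exact hlen)
      (fun q hq => hE q (List.mem_cons_of_mem _ hq))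
    refine ⟨ihlen, fun j hj => ?_⟩
    rw [ihget j hj, List.filter_cons]
    by_cases hpj : p.2 = (j : Int)
    · have hjt : p.2.toNat = j := by omega
      rw [if_pos (by simpa using hpj)]
      rw [PySem.List.pyGetD_natCast, PySem.List.pyGetD_natCast, ← hjt,
        List.getD_eq_getElem?_getD, List.getElem?_set_self (by omega), Option.getD_some,
        List.getD_eq_getElem?_getD, List.map_cons]
      rw [hsp, PySem.List.pyGetD_natCast, List.getD_eq_getElem?_getD]
      simp [List.append_assoc]
      rw [max_eq_left h0]
    · have hjt : p.2.toNat ≠ j := by omega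
      rw [if_neg (by simpa using hpj)]
      rw [PySem.List.pyGetD_natCast, PySem.List.pyGetD_natCast,
        List.getD_eq_getElem?_getD, List.getElem?_set_ne (by omega),
        ← List.getD_eq_getElem?_getD]

theorem pyRange_down (top : Int) (h : 0 ≤ top) :
    PySem.List.pyRange top (-1) (-1)
      = (List.range (top + 1).toNat).map (fun (k : Nat) => top - (k : Int)) := by
  rw [PySem.List.pyRange]
  norm_num
  rw [if_pos (by omega : (-1 : Int) < top)]
  apply List.map_congr_left
  intro k _
  omega

theorem pyRange_up_len (top : Int) (h : 0 ≤ top) :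
    PySem.List.pyRange 0 (top + 1) 1
      = (List.range (top + 1).toNat).map (fun (k : Nat) => (k : Int)) := by
  rw [PySem.List.pyRange]
  norm_num
  rw [if_pos h]

-- ===== VERDICT (by name: the statement is the Claim_ definition above) =====
theorem solve_spec : Claim_equal_solve := by
  intro A B _ hpre
  obtain ⟨hKK, hBC⟩ := hpre
  unfold Spec_solve solve solve_alt
  dsimp only
  -- name the keyword list and the two score functions
  rw [PySem.List.foldl_append_singleton_eq_map, List.nil_append]
  rw [PySem.List.foldl_append_singleton_eq_map, List.nil_append]
  have hmapeq : (PySem.List.enumerate B).map (fun p => (p.1,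
        ((PySem.Str.split? p.2 "_").getD []).foldl
          (fun score w => if containsString
              (((PySem.Str.split? A "_").getD []).foldl (fun t s => addString t s.toList) TDict.nil)
              w.toList then score + 1 else score) (0 : Int)))
      = PySem.List.enumerate (B.map (fun review =>
          (((PySem.Str.split? review "_").getD []).map
            (fun w => if (PySem.Set.ofList ((PySem.Str.split? A "_").getD [])).contains w
                      then (1 : Int) else 0)).sum)) 0 := by
    rw [← enumerate_map]
    apply List.map_congr_left
    intro p hp
    have hpB : p.2 ∈ B := by
      have := PySem.List.map_snd_enumerate B (0 : Int)
      exact this ▸ List.mem_map_of_mem hp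
    exact congrArg (fun z => (p.1, z)) (score_eq A p.2 hKK (hBC p.2 hpB))
  rw [hmapeq]
  -- common notation
  set S : List Int := B.map (fun review =>
      (((PySem.Str.split? review "_").getD []).map
        (fun w => if (PySem.Set.ofList ((PySem.Str.split? A "_").getD [])).contains w
                  then (1 : Int) else 0)).sum) with hS
  set top : Int := PySem.List.maxD S (fun x => x) 0 with htopdef
  have h0S : ∀ s ∈ S, 0 ≤ s := by
    intro s hs
    rcases List.mem_map.mp hs with ⟨r, _, hr⟩
    rw [← hr, PySem.List.sum_map_ite_one_zero]
    exact Int.natCast_nonneg _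
  have htop : 0 ≤ top ∧ ∀ s ∈ S, s ≤ top := by
    by_cases hSe : S = []
    · refine ⟨by rw [htopdef, hSe]; rfl, fun s hs => ?_⟩
      rw [hSe] at hs
      cases hs
    · obtain ⟨m, hm, hmem⟩ := max?_mem_of_ne_nil S hSe
      have hmax : top = m := by rw [htopdef, PySem.List.maxD, hm]; rfl
      exact ⟨by rw [hmax]; exact h0S m hmem,
        fun s hs => by rw [hmax]; exact PySem.List.max?_isMax hm s hs⟩
  obtain ⟨htop0, htople⟩ := htop
  have hNcast : (((top + 1).toNat : Nat) : Int) = top + 1 := by omega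
  -- characterise the descending score range
  have hDdef := pyRange_down top htop0
  have hmemD : ∀ s : Int, 0 ≤ s → s ≤ top → s ∈ PySem.List.pyRange top (-1) (-1) := by
    intro s h1 h2
    rw [hDdef]
    refine List.mem_map.mpr ⟨(top - s).toNat, List.mem_range.mpr (by omega), ?_⟩
    show top - (((top - s).toNat : Nat) : Int) = s
    omega
  have hDmem : ∀ s ∈ PySem.List.pyRange top (-1) (-1), 0 ≤ s ∧ s ≤ top := by
    intro s hs
    rw [hDdef] at hs
    rcases List.mem_map.mp hs with ⟨k, hk, hks⟩
    have := List.mem_range.mp hk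
    omega
  have hDpair : (PySem.List.pyRange top (-1) (-1)).Pairwise (· > ·) := by
    rw [hDdef]
    exact List.Pairwise.map _ (fun a b (h : a < b) => by simp; omega) List.pairwise_lt_range
  -- the A side: stable descending sort = buckets in descending score order
  have hsnd : ∀ x ∈ PySem.List.enumerate S 0, x.2 ∈ S := by
    intro x hx
    have := PySem.List.map_snd_enumerate S (0 : Int)
    exact this ▸ List.mem_map_of_mem hx
  rw [sorted_rev_buckets (fun x : Int × Int => x.2) (PySem.List.enumerate S 0)
      (PySem.List.pyRange top (-1) (-1)) hDpair
      (fun x hx => hmemD x.2 (h0S x.2 (hsnd x hx)) (htople x.2 (hsnd x hx))),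
    List.map_flatMap]
  -- the B side: the bucket-filling fold
  have hlen0 : ((PySem.List.pyRange 0 (top + 1) 1).map
      (fun _ => ([] : List Int))).length = (top + 1).toNat := by
    rw [List.length_map, pyRange_up_len top htop0, List.length_map, List.length_range]
  have hget0 : ∀ j : Nat, ((PySem.List.pyRange 0 (top + 1) 1).map
      (fun _ => ([] : List Int))).getD j [] = [] := by
    intro j
    rw [List.getD_eq_getElem?_getD, List.getElem?_map]
    cases (PySem.List.pyRange 0 (top + 1) 1)[j]? <;> simp
  obtain ⟨hblen, hbget⟩ := buckets_inv (top + 1).toNat (PySem.List.enumerate S 0)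
    ((PySem.List.pyRange 0 (top + 1) 1).map (fun _ => ([] : List Int))) hlen0
    (by intro p hp
        have h1 := h0S p.2 (hsnd p hp)
        have h2 := htople p.2 (hsnd p hp)
        exact ⟨h1, by omega⟩)
  rw [PySem.List.foldl_append_eq_flatMap, List.nil_append]
  -- bucket by bucket
  apply Eq.symm
  apply flatMap_congr_mem
  intro s hs
  obtain ⟨hs0, hstop⟩ := hDmem s hs
  have hscast : ((s.toNat : Nat) : Int) = s := by omega
  rw [← hscast, hbget s.toNat (by omega), PySem.List.pyGetD_natCast, hget0, List.nil_append]
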